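-- pv_equiv track=rewrite | github.com/PacificBiosciences/trgt | trgt/database/comp.py | get_kmers
-- ===== SOURCE A (Python) =====
-- from collections import Counter, defaultdict
--
-- def get_kmers(seq1, seq2, kmer_len = 5, min_freq = 5):
--     def collect(seq):
--         kmers = []
--         index = 0
--         while index + kmer_len <= len(seq):
--             kmer = seq[index: index + kmer_len]
--             kmers.append(kmer)
--             index += 1
--         return kmers
--
--     kmers1 = collect(seq1)
--     kmers2 = collect(seq2)
--
--     frequent1 = set(k for k, c in Counter(kmers1).items() if c >= min_freq)
--     frequent2 = set(k for k, c in Counter(kmers2).items() if c >= min_freq)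
--     frequent = frequent1.union(frequent2)
--
--     kmers1 = set(kmers1).intersection(frequent)
--     kmers2 = set(kmers2).intersection(frequent)
--
--     return kmers1, kmers2
-- ===== SOURCE B (Python) =====
-- def get_kmers(seq1, seq2, kmer_len=5, min_freq=5):
--     def kmers(seq):
--         return [seq[i: i + kmer_len] for i in range(len(seq) - kmer_len + 1)]
--
--     def frequent(ks):
--         # sort the k-mers; a k-mer occurs >= min_freq times iff some window of
--         # width max(min_freq - 1, 0) in the sorted list has equal endpoints
--         s = sorted(ks)
--         w = max(min_freq - 1, 0)
--         return {s[i] for i in range(len(s) - w) if s[i] == s[i + w]}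
--
--     k1 = kmers(seq1)
--     k2 = kmers(seq2)
--     freq = frequent(k1) | frequent(k2)
--     return {k for k in k1 if k in freq}, {k for k in k2 if k in freq}
-- ===== Notes on version B (the rewrite author's own statement) =====
-- stated objective: alternative
-- what changed: B determines frequent k-mers without any counting: it sorts each k-mer list and takes a k-mer as frequent iff some window of width min_freq-1 in the sorted list has equal endpoints (s[i] == s[i+min_freq-1]), replacing A's Counter hash-counting and threshold pass; the results are then the k-mers of each sequence that lie in the combined frequent set.
import Mathlib
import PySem

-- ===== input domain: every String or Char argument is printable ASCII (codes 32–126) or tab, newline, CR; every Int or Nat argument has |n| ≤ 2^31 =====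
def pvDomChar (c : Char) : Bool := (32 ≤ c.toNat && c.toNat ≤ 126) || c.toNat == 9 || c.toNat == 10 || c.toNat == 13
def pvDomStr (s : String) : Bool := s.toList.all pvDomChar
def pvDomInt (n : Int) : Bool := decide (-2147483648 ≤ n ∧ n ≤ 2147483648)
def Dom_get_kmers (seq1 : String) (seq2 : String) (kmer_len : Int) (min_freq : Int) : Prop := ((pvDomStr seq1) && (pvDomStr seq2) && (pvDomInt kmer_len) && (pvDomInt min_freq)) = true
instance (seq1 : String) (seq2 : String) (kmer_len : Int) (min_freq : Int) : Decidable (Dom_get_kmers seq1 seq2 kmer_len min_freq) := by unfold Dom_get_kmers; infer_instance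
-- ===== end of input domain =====

-- B replaces A's Counter-based counting by a sorted-window test: after sorting the k-mers,
-- a k-mer is frequent iff some window of width min_freq-1 has equal endpoints (objective: alternative).

-- ===== PORT A =====
-- the inner 'collect' while-loop of A, index stepping by 1
def pvCollectGo (kmer_len : Int) (seq : String) (index : Int) (acc : List String) : List String :=
  if _h : index + kmer_len ≤ PySem.Str.len seq then
    pvCollectGo kmer_len seq (index + 1)
      (PySem.Str.slice seq (some index) (some (index + kmer_len)) :: acc)
  else acc.reverse
termination_by (PySem.Str.len seq - index - kmer_len + 1).toNat
decreasing_by omega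

def get_kmers (seq1 : String) (seq2 : String) (kmer_len : Int) (min_freq : Int) : List String × List String :=
  let kmers1 := pvCollectGo kmer_len seq1 0 []
  let kmers2 := pvCollectGo kmer_len seq2 0 []
  let frequent1 := PySem.Set.ofList
    (((PySem.Dict.counter kmers1).items.filter (fun p => decide (min_freq ≤ p.2))).map (·.1))
  let frequent2 := PySem.Set.ofList
    (((PySem.Dict.counter kmers2).items.filter (fun p => decide (min_freq ≤ p.2))).map (·.1))
  let frequent := PySem.Set.union frequent1 frequent2
  (PySem.Set.inter (PySem.Set.ofList kmers1) frequent,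
   PySem.Set.inter (PySem.Set.ofList kmers2) frequent)

-- ===== PORT B =====
-- [seq[i:i+kmer_len] for i in range(len(seq) - kmer_len + 1)]
def pvKmersB (kmer_len : Int) (seq : String) : List String :=
  (PySem.List.pyRange 0 (PySem.Str.len seq - kmer_len + 1) 1).map
    (fun i => PySem.Str.slice seq (some i) (some (i + kmer_len)))

-- s = sorted(ks); w = max(min_freq-1, 0); {s[i] for i in range(len(s)-w) if s[i] == s[i+w]}
-- (sorted(ks) (identity key) is ported as Mathlib's stable List.mergeSort, exact for Python's
-- stable sort; s[i] ported with pyGetD: every index the range produces is in bounds)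
def pvFrequentB (min_freq : Int) (ks : List String) : PySem.Set String :=
  let s := ks.mergeSort (fun a b => decide (a ≤ b))
  let w := max (min_freq - 1) 0
  PySem.Set.ofList
    (((PySem.List.pyRange 0 (PySem.List.len s - w) 1).filter
        (fun i => PySem.List.pyGetD s i "" == PySem.List.pyGetD s (i + w) "")).map
      (fun i => PySem.List.pyGetD s i ""))

def get_kmers_alt (seq1 : String) (seq2 : String) (kmer_len : Int) (min_freq : Int) : List String × List String :=
  let k1 := pvKmersB kmer_len seq1
  let k2 := pvKmersB kmer_len seq2
  let freq := PySem.Set.union (pvFrequentB min_freq k1) (pvFrequentB min_freq k2)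
  (PySem.Set.ofList (k1.filter (fun k => PySem.Set.contains freq k)),
   PySem.Set.ofList (k2.filter (fun k => PySem.Set.contains freq k)))

-- ===== PRECONDITION & SPEC =====
def Spec_get_kmers (seq1 : String) (seq2 : String) (kmer_len : Int) (min_freq : Int) (out : List String × List String) : Prop := out = get_kmers_alt seq1 seq2 kmer_len min_freq
instance (seq1 : String) (seq2 : String) (kmer_len : Int) (min_freq : Int) (out : List String × List String) : Decidable (Spec_get_kmers seq1 seq2 kmer_len min_freq out) := by unfold Spec_get_kmers; infer_instance

-- ===== CLAIM (what is proved, stated in full; the proofs are below) =====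
def Claim_equal_get_kmers : Prop := ∀ (seq1 : String) (seq2 : String) (kmer_len : Int) (min_freq : Int), Dom_get_kmers seq1 seq2 kmer_len min_freq → Spec_get_kmers seq1 seq2 kmer_len min_freq (get_kmers seq1 seq2 kmer_len min_freq)

-- ===== LEMMAS AND PROOFS =====

-- A's while-loop collects exactly the slices that B's range comprehension produces.
theorem pvCollectGo_eq (kmer_len : Int) (seq : String) (index : Int) (acc : List String) :
    pvCollectGo kmer_len seq index acc =
      acc.reverse ++ (PySem.List.pyRange index (PySem.Str.len seq - kmer_len + 1) 1).map
        (fun i => PySem.Str.slice seq (some i) (some (i + kmer_len))) := by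
  fun_induction pvCollectGo kmer_len seq index acc with
  | case1 index acc h ih =>
      rw [ih, PySem.List.pyRange_one_cons (by omega : index < PySem.Str.len seq - kmer_len + 1)]
      simp
  | case2 index acc h =>
      rw [PySem.List.pyRange_one_eq_nil (by omega)]
      simp

-- membership in A's 'frequentX' set
theorem pvMem_freqA (min_freq : Int) (X : List String) (k : String) :
    k ∈ PySem.Set.ofList
        (((PySem.Dict.counter X).items.filter (fun p => decide (min_freq ≤ p.2))).map (·.1)) ↔
      k ∈ X ∧ min_freq ≤ (X.count k : Int) := by
  rw [PySem.Set.mem_ofList, PySem.Dict.items_counter, List.filter_map, List.map_map]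
  simp [List.mem_filter, PySem.Set.mem_ofList]

-- in a nondecreasing list, a window of width w with equal endpoints exists iff the value occurs ≥ w+1 times
theorem pvWindow_iff_count (s : List String) (k : String) (w : Nat)
    (hm : ∀ (p q : Nat) (hpq : p ≤ q) (hq : q < s.length),
      s[p]'(Nat.lt_of_le_of_lt hpq hq) ≤ s[q]) :
    (∃ (i : Nat) (h : i + w < s.length), s[i]'(by omega) = k ∧ s[i + w]'h = k) ↔
      w + 1 ≤ s.count k := by
  constructor
  · rintro ⟨i, hiw, hik, hiwk⟩
    have hsub : ((s.drop i).take (w + 1)).Sublist s :=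
      ((s.drop i).take_sublist (w + 1)).trans (s.drop_sublist i)
    have hlen : ((s.drop i).take (w + 1)).length = w + 1 := by
      simp; omega
    have hall : ∀ b ∈ (s.drop i).take (w + 1), k = b := by
      intro b hb
      obtain ⟨j, hj, hjb⟩ := List.getElem_of_mem hb
      rw [List.getElem_take, List.getElem_drop] at hjb
      have hjw : j < w + 1 := by rw [hlen] at hj; exact hj
      have h1 : s[i]'(by omega) ≤ s[i + j]'(by omega) := hm i (i + j) (by omega) (by omega)
      have h2 : s[i + j]'(by omega) ≤ s[i + w]'(by omega) := hm (i + j) (i + w) (by omega) (by omega)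
      rw [hik] at h1; rw [hiwk] at h2
      rw [← hjb]; exact (le_antisymm h2 h1).symm
    calc w + 1 = ((s.drop i).take (w + 1)).count k := by
            rw [List.count_eq_length.mpr hall, hlen]
      _ ≤ s.count k := hsub.count_le k
  · intro hc
    have h0c : 0 < s.count k := by omega
    have hwc : w < s.count k := by omega
    have hj : s.idxOfNth k w < s.length := List.idxOfNth_lt_length_of_lt_count hwc
    have hi0 : s.idxOfNth k 0 < s.length := List.idxOfNth_lt_length_of_lt_count h0c
    have hjk : s[s.idxOfNth k w]'hj = k := List.getElem_idxOfNth_eq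
    have hi0k : s[s.idxOfNth k 0]'hi0 = k := List.getElem_idxOfNth_eq
    -- the w-th occurrence is at least w positions after the first one
    have haux : ∀ n : Nat, n < s.count k → s.idxOfNth k 0 + n ≤ s.idxOfNth k n := by
      intro n
      induction n with
      | zero => intro _; omega
      | succ m ih =>
          intro hm1
          have h1 := ih (by omega)
          have h2 : s.idxOfNth k m < s.idxOfNth k (m + 1) :=
            (List.idxOfNth_lt_idxOfNth_iff_of_lt_count (by omega)).mpr (by omega)
          omega
    have hge : s.idxOfNth k 0 + w ≤ s.idxOfNth k w := haux w hwc
    refine ⟨s.idxOfNth k w - w, by omega, ?_, ?_⟩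
    · have hle1 : s[s.idxOfNth k 0]'hi0 ≤ s[s.idxOfNth k w - w]'(by omega) :=
        hm _ _ (by omega) (by omega)
      have hle2 : s[s.idxOfNth k w - w]'(by omega) ≤ s[s.idxOfNth k w]'hj :=
        hm _ _ (by omega) hj
      rw [hi0k] at hle1; rw [hjk] at hle2
      exact le_antisymm hle2 hle1
    · have heq : s.idxOfNth k w - w + w = s.idxOfNth k w := by omega
      simp only [heq]; exact hjk

-- membership in B's frequent set
theorem pvMem_freqB (min_freq : Int) (ks : List String) (k : String) :
    k ∈ pvFrequentB min_freq ks ↔ k ∈ ks ∧ min_freq ≤ (ks.count k : Int) := by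
  have hperm := List.mergeSort_perm ks (fun a b => decide (a ≤ b))
  have hcnt : (ks.mergeSort (fun a b => decide (a ≤ b))).count k = ks.count k := hperm.count_eq k
  have hmemk : k ∈ ks ↔ 0 < ks.count k := List.count_pos_iff.symm
  have hpair : (ks.mergeSort (fun a b => decide (a ≤ b))).Pairwise
      (fun a b : String => decide (a ≤ b) = true) :=
    List.pairwise_mergeSort (fun a b c hab hbc => by
        simp only [decide_eq_true_eq] at *; exact le_trans hab hbc)
      (fun a b => by simpa using le_total a b) ks
  have hmono : ∀ (p q : Nat) (hpq : p ≤ q) (hq : q < (ks.mergeSort (fun a b => decide (a ≤ b))).length),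
      (ks.mergeSort (fun a b => decide (a ≤ b)))[p]'(Nat.lt_of_le_of_lt hpq hq) ≤
        (ks.mergeSort (fun a b => decide (a ≤ b)))[q] := by
    intro p q hpq hq
    rcases Nat.lt_or_eq_of_le hpq with hlt | heq
    · simpa using List.pairwise_iff_getElem.mp hpair p q (by omega) hq hlt
    · subst heq; exact le_refl _
  have hwin := pvWindow_iff_count (ks.mergeSort (fun a b => decide (a ≤ b))) k
    (max (min_freq - 1) 0).toNat hmono
  set s := ks.mergeSort (fun a b => decide (a ≤ b)) with hsdef
  set w : Int := max (min_freq - 1) 0 with hwdef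
  have hw0 : 0 ≤ w := le_max_right _ _
  have hlhs : k ∈ pvFrequentB min_freq ks ↔
      ∃ (i : Nat) (h : i + w.toNat < s.length), s[i]'(by omega) = k ∧ s[i + w.toNat]'h = k := by
    rw [pvFrequentB, PySem.Set.mem_ofList]
    simp only [← hsdef, ← hwdef, List.mem_map, List.mem_filter,
      PySem.List.mem_pyRange_one, PySem.List.len_eq, beq_iff_eq]
    constructor
    · rintro ⟨i, ⟨⟨hi0, hilt⟩, hbeq⟩, hival⟩
      have hiL : i < (s.length : Int) := by omega
      have hiwL : i + w < (s.length : Int) := by omega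
      rw [PySem.List.pyGetD_eq_getElem s "" hi0 hiL] at hival hbeq
      rw [PySem.List.pyGetD_eq_getElem s "" (by omega) hiwL] at hbeq
      have hidx : (i + w).toNat = i.toNat + w.toNat := by omega
      refine ⟨i.toNat, by omega, hival, ?_⟩
      have h2 : s[(i + w).toNat]'(by omega) = k := by rw [← hbeq]; exact hival
      simpa only [hidx] using h2
    · rintro ⟨i, h, h1, h2⟩
      refine ⟨(i : Int), ⟨⟨by omega, by omega⟩, ?_⟩, ?_⟩
      · rw [PySem.List.pyGetD_eq_getElem s "" (by omega) (by omega),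
          PySem.List.pyGetD_eq_getElem s "" (by omega) (by omega)]
        have hidx2 : ((i : Int) + w).toNat = i + w.toNat := by omega
        simp only [Int.toNat_natCast, hidx2]
        rw [h1, h2]
      · rw [PySem.List.pyGetD_eq_getElem s "" (by omega) (by omega)]
        simpa using h1
  rw [hlhs, hwin, hcnt, hmemk]
  omega

-- set(l.filter p) is (set l).filter p
theorem pvOfList_filter (l : List String) (p : String → Bool) :
    PySem.Set.ofList (l.filter p) = (PySem.Set.ofList l).filter p := by
  induction l using List.reverseRecOn with
  | nil => rfl
  | append_singleton l x ih =>
      rw [List.filter_append, PySem.Set.ofList_append_singleton, PySem.Set.add_eq_ite]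
      by_cases hmem : x ∈ PySem.Set.ofList l
      · rw [if_pos hmem]
        cases hx : p x with
        | false => simpa [List.filter_cons, hx] using ih
        | true =>
            have hxl : x ∈ l := (PySem.Set.mem_ofList l x).mp hmem
            have hxf : x ∈ PySem.Set.ofList (l.filter p) :=
              (PySem.Set.mem_ofList _ x).mpr (List.mem_filter.mpr ⟨hxl, hx⟩)
            simp only [List.filter_cons, hx, List.filter_nil, if_true,
              PySem.Set.ofList_append_singleton, PySem.Set.add_eq_ite, if_pos hxf]
            exact ih
      · rw [if_neg hmem, List.filter_append]
        cases hx : p x with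
        | false => simpa [List.filter_cons, hx] using ih
        | true =>
            have hxl : x ∉ l := fun h => hmem ((PySem.Set.mem_ofList l x).mpr h)
            have hxf : x ∉ PySem.Set.ofList (l.filter p) := fun h =>
              hxl (List.mem_filter.mp ((PySem.Set.mem_ofList _ x).mp h)).1
            simp only [List.filter_cons, hx, List.filter_nil, if_true,
              PySem.Set.ofList_append_singleton, PySem.Set.add_eq_ite, if_neg hxf]
            rw [ih]

-- one output component: A's 'set(L) & frequent' = B's '{k for k in L if k in freq}'
theorem pvSide_eq (L : List String) (fA fB : PySem.Set String)
    (h : ∀ k, k ∈ fA ↔ k ∈ fB) :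
    PySem.Set.inter (PySem.Set.ofList L) fA =
      PySem.Set.ofList (L.filter (fun k => PySem.Set.contains fB k)) := by
  rw [pvOfList_filter]
  show (PySem.Set.ofList L).filter (fun x => PySem.Set.contains fA x) = _
  apply List.filter_congr
  intro k _
  rw [Bool.eq_iff_iff, PySem.Set.contains_iff, PySem.Set.contains_iff]
  exact h k

-- ===== VERDICT (by name: the statement is the Claim_ definition above) =====
theorem get_kmers_spec : Claim_equal_get_kmers := by
  intro seq1 seq2 kmer_len min_freq _hdom
  show _ = _
  unfold get_kmers get_kmers_alt
  rw [pvCollectGo_eq kmer_len seq1 0 [], pvCollectGo_eq kmer_len seq2 0 []]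
  simp only [List.reverse_nil, List.nil_append]
  have hk1 : (PySem.List.pyRange 0 (PySem.Str.len seq1 - kmer_len + 1) 1).map
      (fun i => PySem.Str.slice seq1 (some i) (some (i + kmer_len))) = pvKmersB kmer_len seq1 := rfl
  have hk2 : (PySem.List.pyRange 0 (PySem.Str.len seq2 - kmer_len + 1) 1).map
      (fun i => PySem.Str.slice seq2 (some i) (some (i + kmer_len))) = pvKmersB kmer_len seq2 := rfl
  rw [hk1, hk2]
  have hmem : ∀ k, k ∈ PySem.Set.union
      (PySem.Set.ofList (((PySem.Dict.counter (pvKmersB kmer_len seq1)).items.filter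
          (fun p => decide (min_freq ≤ p.2))).map (·.1)))
      (PySem.Set.ofList (((PySem.Dict.counter (pvKmersB kmer_len seq2)).items.filter
          (fun p => decide (min_freq ≤ p.2))).map (·.1))) ↔
      k ∈ PySem.Set.union (pvFrequentB min_freq (pvKmersB kmer_len seq1))
          (pvFrequentB min_freq (pvKmersB kmer_len seq2)) := by
    intro k
    rw [PySem.Set.mem_union, PySem.Set.mem_union, pvMem_freqA, pvMem_freqA,
      pvMem_freqB, pvMem_freqB]
  exact Prod.ext (pvSide_eq _ _ _ hmem) (pvSide_eq _ _ _ hmem)
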